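-- pv_equiv track=rewrite | github.com/raihan19/DocuGenerator | functions.py | refprd_list
-- ===== SOURCE A (Python) =====
-- def refprd_list(data,atlas):
--     allAtlas = []
--     refprd_string_list = ''
--     for atlasI in data['Referenzen']:
--         allAtlas.append(atlasI['name'])
--     for atlas_length in range(len(allAtlas)):
--         if allAtlas[atlas_length] == atlas:
--             refprd_string_list = data['Referenzen'][atlas_length]['refprd']
--             break
--     return refprd_string_list
-- ===== SOURCE B (Python) =====
-- def refprd_list(data, atlas):
--     for element in data['Referenzen']:
--         if element['name'] == atlas:
--             return element['refprd']
--     return ''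
-- ===== Notes on version B (the rewrite author's own statement) =====
-- stated objective: simpler
-- what changed: Replaces the build-a-name-list pass plus an index-based scan with a single direct pass over the reference dicts that returns on the first match.
import Mathlib
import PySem

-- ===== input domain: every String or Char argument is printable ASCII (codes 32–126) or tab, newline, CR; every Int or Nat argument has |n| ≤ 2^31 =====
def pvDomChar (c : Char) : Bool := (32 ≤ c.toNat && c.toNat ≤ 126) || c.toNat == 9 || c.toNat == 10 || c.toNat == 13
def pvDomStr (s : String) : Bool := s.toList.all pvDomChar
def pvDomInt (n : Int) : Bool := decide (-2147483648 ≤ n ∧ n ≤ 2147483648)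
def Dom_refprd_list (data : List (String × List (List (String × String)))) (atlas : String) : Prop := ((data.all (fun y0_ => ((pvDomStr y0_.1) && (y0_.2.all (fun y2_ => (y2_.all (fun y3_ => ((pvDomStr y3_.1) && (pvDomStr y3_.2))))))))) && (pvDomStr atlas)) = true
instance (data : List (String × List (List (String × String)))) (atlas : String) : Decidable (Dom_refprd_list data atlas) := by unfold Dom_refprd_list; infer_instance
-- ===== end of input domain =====

-- B replaces A's two passes (build allAtlas, then index-scan it) by one direct pass with an
-- early return; return values are proved equal on Pre_ (no mutation in either program).

-- ===== PORT A =====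
-- the second loop: 'for atlas_length in range(len(allAtlas)): if …: …; break'
def pvLoopA (refs : List (List (String × String))) (allAtlas : List String)
    (atlas : String) : List Int → String
  | [] => ""
  | i :: rest =>
    if PySem.List.pyGetD allAtlas i "" == atlas then
      (PySem.Dict.mk (PySem.List.pyGetD refs i [])).getD "refprd" ""
    else pvLoopA refs allAtlas atlas rest

def refprd_list (data : List (String × List (List (String × String)))) (atlas : String) : String :=
  let refs := (PySem.Dict.mk data).getD "Referenzen" []
  let allAtlas := refs.map (fun d => (PySem.Dict.mk d).getD "name" "")
  pvLoopA refs allAtlas atlas (PySem.List.pyRange 0 allAtlas.length 1)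

-- ===== PORT B =====
-- 'for element in data["Referenzen"]: if element["name"] == atlas: return element["refprd"]'
def pvLoopB (atlas : String) : List (List (String × String)) → String
  | [] => ""
  | d :: rest =>
    if (PySem.Dict.mk d).getD "name" "" == atlas then (PySem.Dict.mk d).getD "refprd" ""
    else pvLoopB atlas rest

def refprd_list_alt (data : List (String × List (List (String × String)))) (atlas : String) : String :=
  pvLoopB atlas ((PySem.Dict.mk data).getD "Referenzen" [])

-- ===== PRECONDITION & SPEC =====
-- Pre_ excludes exactly the KeyError inputs of A: no 'Referenzen' key, an element without a
-- 'name' key, or a first matching element without a 'refprd' key.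
def Pre_refprd_list (data : List (String × List (List (String × String)))) (atlas : String) : Prop :=
  (((PySem.Dict.mk data).get? "Referenzen").isSome
    && (((PySem.Dict.mk data).getD "Referenzen" []).all
          (fun d => ((PySem.Dict.mk d).get? "name").isSome))
    && ((((PySem.Dict.mk data).getD "Referenzen" []).find?
          (fun d => (PySem.Dict.mk d).get? "name" == some atlas)).all
          (fun d => ((PySem.Dict.mk d).get? "refprd").isSome))) = true
instance (data : List (String × List (List (String × String)))) (atlas : String) : Decidable (Pre_refprd_list data atlas) := by unfold Pre_refprd_list; infer_instance

def pvWitness_refprd_list : (List (String × List (List (String × String)))) × String :=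
  ([("Referenzen", [[("name", "a"), ("refprd", "p")], [("name", "b"), ("refprd", "q")]])], "b")

def Spec_refprd_list (data : List (String × List (List (String × String)))) (atlas : String) (out : String) : Prop := out = refprd_list_alt data atlas
instance (data : List (String × List (List (String × String)))) (atlas : String) (out : String) : Decidable (Spec_refprd_list data atlas out) := by unfold Spec_refprd_list; infer_instance

-- ===== CLAIM (what is proved, stated in full; the proofs are below) =====
def Claim_equal_refprd_list : Prop := ∀ (data : List (String × List (List (String × String)))) (atlas : String), Dom_refprd_list data atlas → Pre_refprd_list data atlas → Spec_refprd_list data atlas (refprd_list data atlas)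

-- ===== LEMMAS AND PROOFS =====

-- A's index loop over range(k, len refs) equals B's direct pass over refs.drop k.
theorem pvLoopA_eq_loopB (refs : List (List (String × String))) (atlas : String) (k : Nat)
    (hk : k ≤ refs.length) :
    pvLoopA refs (refs.map (fun d => (PySem.Dict.mk d).getD "name" "")) atlas
        (PySem.List.pyRange (k : Int) (refs.length : Int) 1)
      = pvLoopB atlas (refs.drop k) := by
  induction hn : refs.length - k generalizing k with
  | zero =>
    have hkl : k = refs.length := by omega
    subst hkl
    rw [PySem.List.pyRange_one_eq_nil (by omega), List.drop_length]
    rfl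
  | succ n ih =>
    have hlt : k < refs.length := by omega
    rw [PySem.List.pyRange_one_cons (by exact_mod_cast hlt)]
    have hdrop : refs.drop k = refs[k] :: refs.drop (k + 1) :=
      List.drop_eq_getElem_cons hlt
    rw [hdrop]
    show (if PySem.List.pyGetD (refs.map _) (k : Int) "" == atlas then _ else _) = _
    rw [PySem.List.pyGetD_natCast, List.getD_eq_getElem _ _ (by simpa using hlt),
      List.getElem_map]
    unfold pvLoopB
    by_cases h : ((PySem.Dict.mk refs[k]).getD "name" "" == atlas) = true
    · simp only [h, if_true]
      rw [PySem.List.pyGetD_natCast, List.getD_eq_getElem _ _ hlt]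
    · simp only [h, if_false, Bool.false_eq_true]
      have : ((k : Int) + 1) = ((k + 1 : Nat) : Int) := by push_cast; ring
      rw [this]
      exact ih (k + 1) (by omega) (by omega)

-- ===== VERDICT (by name: the statement is the Claim_ definition above) =====
theorem refprd_list_spec : Claim_equal_refprd_list := by
  intro data atlas _ _
  show refprd_list data atlas = refprd_list_alt data atlas
  unfold refprd_list refprd_list_alt
  simp only [List.length_map]
  exact pvLoopA_eq_loopB _ atlas 0 (Nat.zero_le _)
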